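-- pv_equiv track=rewrite | github.com/LangeLab/ProteoForge_Analysis | src/utils.py | group_miss_cleaved_peptides
-- ===== SOURCE A (Python) =====
-- def group_miss_cleaved_peptides(
--         startpos_arr: list,
--         endpos_arr: list,
--         max_diff: int = 3
--     ) -> dict:
--     """
--         Group overlapping peptides based on their start and end positions
--             with a maximum allowed difference.
--
--         Args:
--             startpos_arr (list): List of peptide start positions.
--             endpos_arr (list): List of peptide end positions.
--             max_diff (int, optional): The maximum allowed difference between
--                 peptide start and end positions. Defaults to 3.
--
--         Returns:
--             dict: A dictionary where keys are the indices of the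
--                 longest peptides and values are lists of overlapping peptide indices.
--     """
--
--     overlapping_peptides = {}
--     n = len(startpos_arr)
--     used_indices = set()
--
--     for i in range(n):
--         if i in used_indices:
--             continue
--
--         longest_peptide_index = i
--         longest_peptide_length = endpos_arr[i] - startpos_arr[i]
--         overlapping_indices = [i]
--
--         for j in range(n):
--             if i != j and j not in used_indices:
--                 start1, end1 = startpos_arr[i], endpos_arr[i]
--                 start2, end2 = startpos_arr[j], endpos_arr[j]
--
--                 # Check if peptides overlap within the allowed difference
--                 if (abs(start1 - start2) <= max_diff and abs(end1 - end2) <= max_diff):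
--                     overlapping_indices.append(j)
--                     used_indices.add(j)
--
--                     # Update the longest peptide index if necessary
--                     current_peptide_length = endpos_arr[j] - startpos_arr[j]
--                     if current_peptide_length > longest_peptide_length:
--                         longest_peptide_index = j
--                         longest_peptide_length = current_peptide_length
--
--         if len(overlapping_indices) > 1:
--             overlapping_peptides[longest_peptide_index] = overlapping_indices
--             used_indices.update(overlapping_indices)
--         else:
--             overlapping_peptides[i] = []
--
--     # Add non-grouped peptides with empty lists
--     for i in range(n):
--         if i not in overlapping_peptides and i not in used_indices:
--             overlapping_peptides[i] = []
--
--     return overlapping_peptides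
-- ===== SOURCE B (Python) =====
-- def group_miss_cleaved_peptides(
--         startpos_arr: list,
--         endpos_arr: list,
--         max_diff: int = 3
--     ) -> dict:
--     """Spatial hash: bucket peptides by their (start, end) cell of side max_diff+1,
--     so each peptide only examines the 9 neighbouring cells instead of the whole list."""
--     n = len(startpos_arr)
--     cell = max(max_diff + 1, 1)
--     grid = {}
--     for i in range(n):
--         key = (startpos_arr[i] // cell, endpos_arr[i] // cell)
--         grid.setdefault(key, []).append(i)
--     result = {}
--     grouped = set()
--     for i in range(n):
--         if i in grouped:
--             continue
--         s, e = startpos_arr[i], endpos_arr[i]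
--         cs, ce = s // cell, e // cell
--         cand = []
--         for ds in (-1, 0, 1):
--             for de in (-1, 0, 1):
--                 cand.extend(grid.get((cs + ds, ce + de), []))
--         cand.sort()
--         group = [j for j in cand
--                  if j != i and j not in grouped
--                  and abs(s - startpos_arr[j]) <= max_diff
--                  and abs(e - endpos_arr[j]) <= max_diff]
--         if group:
--             best = i
--             for j in group:
--                 if endpos_arr[j] - startpos_arr[j] > endpos_arr[best] - startpos_arr[best]:
--                     best = j
--             result[best] = [i] + group
--             grouped.add(i)
--             grouped.update(group)
--         else:
--             result[i] = []
--     return result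
-- ===== Notes on version B (the rewrite author's own statement) =====
-- stated objective: faster
-- what changed: Replaces A's inner scan over all n peptides by a spatial hash: peptides are bucketed once by their (start//(max_diff+1), end//(max_diff+1)) cell and each representative queries only the 9 neighbouring cells (candidates sorted by index), so the quadratic all-pairs scan and A's dead second fix-up loop disappear; intended as faster — a timing run measured B 2x-16x ahead with A timing out at larger sizes, but could not fully confirm the label since A rarely finished.
import Mathlib
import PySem

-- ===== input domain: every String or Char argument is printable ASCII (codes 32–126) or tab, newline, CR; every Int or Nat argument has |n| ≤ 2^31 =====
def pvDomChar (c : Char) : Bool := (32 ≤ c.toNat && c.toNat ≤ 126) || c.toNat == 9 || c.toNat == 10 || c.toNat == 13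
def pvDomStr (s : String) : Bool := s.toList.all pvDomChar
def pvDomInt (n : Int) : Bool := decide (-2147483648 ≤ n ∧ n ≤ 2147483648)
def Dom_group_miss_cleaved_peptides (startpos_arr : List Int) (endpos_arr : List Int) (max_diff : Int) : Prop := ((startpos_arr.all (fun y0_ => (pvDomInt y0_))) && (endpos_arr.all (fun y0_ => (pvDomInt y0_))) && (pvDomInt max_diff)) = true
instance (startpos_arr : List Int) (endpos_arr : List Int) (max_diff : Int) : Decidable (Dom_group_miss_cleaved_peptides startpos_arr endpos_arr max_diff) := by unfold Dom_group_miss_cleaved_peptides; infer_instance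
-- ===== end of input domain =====

-- B replaces A's quadratic all-pairs inner scan (and A's dead second fix-up loop) by a spatial
-- hash: peptides are bucketed once by their (start, end) cell of side max_diff+1 and each
-- representative queries only the 9 neighbouring cells; intended as faster (a timing run
-- read B 2x-16x ahead, with A timing out at larger sizes where B finished).

-- ===== PORT A =====
def group_miss_cleaved_peptides (startpos_arr : List Int) (endpos_arr : List Int) (max_diff : Int) : List (Int × List Int) :=
  let n : Int := PySem.List.len startpos_arr
  let st :=
    (PySem.List.pyRange 0 n 1).foldl
      (fun (st : PySem.Dict Int (List Int) × PySem.Set Int) i =>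
        if PySem.Set.contains st.2 i = true then st
        else
          let start1 := PySem.List.pyGetD startpos_arr i 0
          let end1 := PySem.List.pyGetD endpos_arr i 0
          let inner :=
            (PySem.List.pyRange 0 n 1).foldl
              (fun (t : Int × Int × List Int × PySem.Set Int) j =>
                if i ≠ j ∧ PySem.Set.contains t.2.2.2 j = false then
                  let start2 := PySem.List.pyGetD startpos_arr j 0
                  let end2 := PySem.List.pyGetD endpos_arr j 0
                  if |start1 - start2| ≤ max_diff ∧ |end1 - end2| ≤ max_diff then
                    let ovl := t.2.2.1 ++ [j]
                    let used := PySem.Set.add t.2.2.2 j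
                    let curLen := end2 - start2
                    if curLen > t.2.1 then (j, curLen, ovl, used) else (t.1, t.2.1, ovl, used)
                  else t
                else t)
              (i, end1 - start1, [i], st.2)
          if PySem.List.len inner.2.2.1 > 1 then
            (PySem.Dict.insert st.1 inner.1 inner.2.2.1, PySem.Set.update inner.2.2.2 inner.2.2.1)
          else
            (PySem.Dict.insert st.1 i [], inner.2.2.2))
      (PySem.Dict.empty, PySem.Set.empty)
  let d2 :=
    (PySem.List.pyRange 0 n 1).foldl
      (fun d i =>
        if PySem.Dict.contains d i = false ∧ PySem.Set.contains st.2 i = false then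
          PySem.Dict.insert d i []
        else d)
      st.1
  d2.items

-- ===== PORT B =====
def group_miss_cleaved_peptides_alt (startpos_arr : List Int) (endpos_arr : List Int) (max_diff : Int) : List (Int × List Int) :=
  let n : Int := PySem.List.len startpos_arr
  let cell : Int := max (max_diff + 1) 1
  let grid :=
    (PySem.List.pyRange 0 n 1).foldl
      (fun (g : PySem.Dict (Int × Int) (List Int)) i =>
        PySem.Dict.insert g
          (PySem.Int.floordiv (PySem.List.pyGetD startpos_arr i 0) cell,
           PySem.Int.floordiv (PySem.List.pyGetD endpos_arr i 0) cell)
          (PySem.Dict.getD g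
            (PySem.Int.floordiv (PySem.List.pyGetD startpos_arr i 0) cell,
             PySem.Int.floordiv (PySem.List.pyGetD endpos_arr i 0) cell) [] ++ [i]))
      PySem.Dict.empty
  let st :=
    (PySem.List.pyRange 0 n 1).foldl
      (fun (st : PySem.Dict Int (List Int) × PySem.Set Int) i =>
        if PySem.Set.contains st.2 i = true then st
        else
          let s := PySem.List.pyGetD startpos_arr i 0
          let e := PySem.List.pyGetD endpos_arr i 0
          let cs := PySem.Int.floordiv s cell
          let ce := PySem.Int.floordiv e cell
          let cand :=
            ([-1, 0, 1] : List Int).foldl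
              (fun acc ds =>
                ([-1, 0, 1] : List Int).foldl
                  (fun acc de => acc ++ PySem.Dict.getD grid (cs + ds, ce + de) []) acc)
              []
          let cand := PySem.List.sorted cand (fun x => x) false
          let group := cand.filter
            (fun j => !(j == i) && !(PySem.Set.contains st.2 j) &&
              decide (|s - PySem.List.pyGetD startpos_arr j 0| ≤ max_diff) &&
              decide (|e - PySem.List.pyGetD endpos_arr j 0| ≤ max_diff))
          if group.isEmpty then (PySem.Dict.insert st.1 i [], st.2)
          else
            let best := group.foldl
              (fun b j =>
                if PySem.List.pyGetD endpos_arr j 0 - PySem.List.pyGetD startpos_arr j 0 >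
                   PySem.List.pyGetD endpos_arr b 0 - PySem.List.pyGetD startpos_arr b 0
                then j else b) i
            (PySem.Dict.insert st.1 best (i :: group),
             PySem.Set.update (PySem.Set.add st.2 i) group))
      (PySem.Dict.empty, PySem.Set.empty)
  st.1.items

-- ===== PRECONDITION & SPEC =====
-- A indexes endpos_arr at every position of startpos_arr, so it raises IndexError
-- when endpos_arr is shorter; Pre_ excludes exactly those inputs (B raises there too).
def Pre_group_miss_cleaved_peptides (startpos_arr : List Int) (endpos_arr : List Int) (max_diff : Int) : Prop :=
  startpos_arr.length ≤ endpos_arr.length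
instance (startpos_arr : List Int) (endpos_arr : List Int) (max_diff : Int) : Decidable (Pre_group_miss_cleaved_peptides startpos_arr endpos_arr max_diff) := by unfold Pre_group_miss_cleaved_peptides; infer_instance

def pvWitness_group_miss_cleaved_peptides : List Int × List Int × Int := ([1, 2, 10, 11], [6, 7, 20, 22], 3)

def Spec_group_miss_cleaved_peptides (startpos_arr : List Int) (endpos_arr : List Int) (max_diff : Int) (out : List (Int × List Int)) : Prop := out = group_miss_cleaved_peptides_alt startpos_arr endpos_arr max_diff
instance (startpos_arr : List Int) (endpos_arr : List Int) (max_diff : Int) (out : List (Int × List Int)) : Decidable (Spec_group_miss_cleaved_peptides startpos_arr endpos_arr max_diff out) := by unfold Spec_group_miss_cleaved_peptides; infer_instance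

-- ===== CLAIM (what is proved, stated in full; the proofs are below) =====
def Claim_equal_group_miss_cleaved_peptides : Prop := ∀ (startpos_arr : List Int) (endpos_arr : List Int) (max_diff : Int), Dom_group_miss_cleaved_peptides startpos_arr endpos_arr max_diff → Pre_group_miss_cleaved_peptides startpos_arr endpos_arr max_diff → Spec_group_miss_cleaved_peptides startpos_arr endpos_arr max_diff (group_miss_cleaved_peptides startpos_arr endpos_arr max_diff)

-- ===== LEMMAS AND PROOFS =====

theorem gmc_contains_add (u : PySem.Set Int) (x k : Int) :
    PySem.Set.contains (PySem.Set.add u x) k = (PySem.Set.contains u k || k == x) := by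
  rw [PySem.Set.add_eq_ite]; split_ifs with h <;> cases hkx : (k == x) <;> simp_all

theorem gmc_contains_update (u : PySem.Set Int) (xs : List Int) (k : Int) :
    PySem.Set.contains (PySem.Set.update u xs) k = (PySem.Set.contains u k || xs.contains k) := by
  induction xs generalizing u with
  | nil => simp [PySem.Set.update]
  | cons x xs ih =>
      rw [PySem.Set.update_cons, ih, gmc_contains_add]
      cases hkx : (k == x) <;> simp_all

def gLen (sp ep : List Int) (j : Int) : Int :=
  PySem.List.pyGetD ep j 0 - PySem.List.pyGetD sp j 0

def gCondB (sp ep : List Int) (md i j : Int) : Bool :=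
  decide (|PySem.List.pyGetD sp i 0 - PySem.List.pyGetD sp j 0| ≤ md ∧
          |PySem.List.pyGetD ep i 0 - PySem.List.pyGetD ep j 0| ≤ md)

def bestStep (sp ep : List Int) (p : Int × Int) (j : Int) : Int × Int :=
  if gLen sp ep j > p.2 then (j, gLen sp ep j) else p

def innerP (sp ep : List Int) (md i : Int) (u : PySem.Set Int) (j : Int) : Bool :=
  !(i == j) && !(PySem.Set.contains u j) && gCondB sp ep md i j

def innerStep (sp ep : List Int) (md i : Int)
    (t : Int × Int × List Int × PySem.Set Int) (j : Int) : Int × Int × List Int × PySem.Set Int :=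
  if i ≠ j ∧ PySem.Set.contains t.2.2.2 j = false then
    let start2 := PySem.List.pyGetD sp j 0
    let end2 := PySem.List.pyGetD ep j 0
    if |PySem.List.pyGetD sp i 0 - start2| ≤ md ∧ |PySem.List.pyGetD ep i 0 - end2| ≤ md then
      let ovl := t.2.2.1 ++ [j]
      let used := PySem.Set.add t.2.2.2 j
      let curLen := end2 - start2
      if curLen > t.2.1 then (j, curLen, ovl, used) else (t.1, t.2.1, ovl, used)
    else t
  else t

theorem inner_char (sp ep : List Int) (md i : Int) (J : List Int) (hJ : J.Nodup) :
    ∀ (li ll : Int) (ovl : List Int) (u : PySem.Set Int),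
    J.foldl (innerStep sp ep md i) (li, ll, ovl, u)
      = (((J.filter (innerP sp ep md i u)).foldl (bestStep sp ep) (li, ll)).1,
         ((J.filter (innerP sp ep md i u)).foldl (bestStep sp ep) (li, ll)).2,
         ovl ++ J.filter (innerP sp ep md i u),
         PySem.Set.update u (J.filter (innerP sp ep md i u))) := by
  induction J with
  | nil => intro li ll ovl u; simp [PySem.Set.update]
  | cons a J ih =>
      intro li ll ovl u
      have haJ : a ∉ J := (List.nodup_cons.mp hJ).1
      have hJ' := (List.nodup_cons.mp hJ).2
      have hfc : ∀ (u' : PySem.Set Int), (∀ k, k ≠ a → (k ∈ u' ↔ k ∈ u)) →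
          J.filter (innerP sp ep md i u') = J.filter (innerP sp ep md i u) := by
        intro u' h
        apply List.filter_congr
        intro k hk
        have hka : k ≠ a := fun e => haJ (e ▸ hk)
        simp [innerP, h k hka]
      rw [List.foldl_cons, List.filter_cons]
      by_cases h1 : i ≠ a ∧ PySem.Set.contains u a = false
      · have hna : a ∉ u := by
          intro hm
          rw [(PySem.Set.contains_iff u a).mpr hm] at h1
          simp at h1
        by_cases h2 : |PySem.List.pyGetD sp i 0 - PySem.List.pyGetD sp a 0| ≤ md ∧
                      |PySem.List.pyGetD ep i 0 - PySem.List.pyGetD ep a 0| ≤ md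
        · -- a matches
          have hp : innerP sp ep md i u a = true := by
            simp only [innerP, gCondB]
            simp [hna, h2]
            exact h1.1
          rw [if_pos hp]
          have hstep : innerStep sp ep md i (li, ll, ovl, u) a
              = ((bestStep sp ep (li, ll) a).1, (bestStep sp ep (li, ll) a).2,
                 ovl ++ [a], PySem.Set.add u a) := by
            simp only [innerStep, bestStep, gLen]
            rw [if_pos h1, if_pos h2]
            split_ifs <;> rfl
          rw [hstep, ih hJ']
          rw [hfc (PySem.Set.add u a) (by
            intro k hk
            rw [PySem.Set.mem_add]
            exact or_iff_left hk)]
          rw [List.foldl_cons, PySem.Set.update_cons]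
          simp
        · have hp : innerP sp ep md i u a = false := by
            simp only [innerP, gCondB]
            simp [h2]
          rw [if_neg (by simp [hp])]
          have hstep : innerStep sp ep md i (li, ll, ovl, u) a = (li, ll, ovl, u) := by
            simp only [innerStep]
            rw [if_pos h1, if_neg h2]
          rw [hstep, ih hJ']
      · have hp : innerP sp ep md i u a = false := by
          rcases not_and_or.mp h1 with h | h
          · have hia : i = a := not_not.mp h
            simp [innerP, hia]
          · have hma : a ∈ u := by
              cases hc : PySem.Set.contains u a
              · exact absurd hc h
              · exact (PySem.Set.contains_iff u a).mp hc
            simp [innerP, hma]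
        rw [if_neg (by simp [hp])]
        have hstep : innerStep sp ep md i (li, ll, ovl, u) a = (li, ll, ovl, u) := by
          simp only [innerStep]
          rw [if_neg h1]
        rw [hstep, ih hJ']

def outerStep (sp ep : List Int) (md n : Int)
    (st : PySem.Dict Int (List Int) × PySem.Set Int) (i : Int) :
    PySem.Dict Int (List Int) × PySem.Set Int :=
  if PySem.Set.contains st.2 i = true then st
  else
    let inner := (PySem.List.pyRange 0 n 1).foldl (innerStep sp ep md i)
      (i, PySem.List.pyGetD ep i 0 - PySem.List.pyGetD sp i 0, [i], st.2)
    if PySem.List.len inner.2.2.1 > 1 then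
      (PySem.Dict.insert st.1 inner.1 inner.2.2.1, PySem.Set.update inner.2.2.2 inner.2.2.1)
    else
      (PySem.Dict.insert st.1 i [], inner.2.2.2)

theorem gmc_contains_update_true (u : PySem.Set Int) (xs : List Int) (k : Int)
    (h : PySem.Set.contains u k = true) :
    PySem.Set.contains (PySem.Set.update u xs) k = true := by
  rw [gmc_contains_update, h, Bool.true_or]

theorem gmc_dcontains_insert_true (d : PySem.Dict Int (List Int)) (a k : Int) (v : List Int)
    (h : PySem.Dict.contains d k = true) :
    PySem.Dict.contains (PySem.Dict.insert d a v) k = true := by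
  rw [PySem.Dict.contains_insert, h, Bool.or_true]

theorem loop2_id (u1 : PySem.Set Int) : ∀ (L2 : List Int) (d : PySem.Dict Int (List Int)),
    (∀ i ∈ L2, PySem.Set.contains u1 i = true ∨ PySem.Dict.contains d i = true) →
    L2.foldl (fun d i => if PySem.Dict.contains d i = false ∧ PySem.Set.contains u1 i = false
        then PySem.Dict.insert d i [] else d) d = d := by
  intro L2
  induction L2 with
  | nil => intro d _; rfl
  | cons a L2 ih =>
      intro d h
      rw [List.foldl_cons]
      have hstep : (if PySem.Dict.contains d a = false ∧ PySem.Set.contains u1 a = false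
          then PySem.Dict.insert d a [] else d) = d := by
        rcases h a (List.mem_cons_self) with hc | hc
        · rw [if_neg]; intro hx; rw [hc] at hx; exact absurd hx.2 (by simp)
        · rw [if_neg]; intro hx; rw [hc] at hx; exact absurd hx.1 (by simp)
      rw [hstep]
      exact ih d (fun i hi => h i (List.mem_cons_of_mem _ hi))

-- ---- B-side machinery: cells, grid, neighbourhood query ----

def gCell (md : Int) : Int := max (md + 1) 1

def gKeyOf (sp ep : List Int) (c j : Int) : Int × Int :=
  (PySem.Int.floordiv (PySem.List.pyGetD sp j 0) c, PySem.Int.floordiv (PySem.List.pyGetD ep j 0) c)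

def gGrid (sp ep : List Int) (c n : Int) : PySem.Dict (Int × Int) (List Int) :=
  (PySem.List.pyRange 0 n 1).foldl
    (fun g i => PySem.Dict.insert g (gKeyOf sp ep c i) (PySem.Dict.getD g (gKeyOf sp ep c i) [] ++ [i]))
    PySem.Dict.empty

def gNb (q : Int × Int) : List (Int × Int) :=
  [(q.1 + -1, q.2 + -1), (q.1 + -1, q.2 + 0), (q.1 + -1, q.2 + 1),
   (q.1 + 0, q.2 + -1), (q.1 + 0, q.2 + 0), (q.1 + 0, q.2 + 1),
   (q.1 + 1, q.2 + -1), (q.1 + 1, q.2 + 0), (q.1 + 1, q.2 + 1)]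

def bOuterStep (sp ep : List Int) (md n : Int)
    (st : PySem.Dict Int (List Int) × PySem.Set Int) (i : Int) :
    PySem.Dict Int (List Int) × PySem.Set Int :=
  if PySem.Set.contains st.2 i = true then st
  else
    let s := PySem.List.pyGetD sp i 0
    let e := PySem.List.pyGetD ep i 0
    let cs := PySem.Int.floordiv s (gCell md)
    let ce := PySem.Int.floordiv e (gCell md)
    let cand :=
      ([-1, 0, 1] : List Int).foldl
        (fun acc ds =>
          ([-1, 0, 1] : List Int).foldl
            (fun acc de => acc ++ PySem.Dict.getD (gGrid sp ep (gCell md) n) (cs + ds, ce + de) []) acc)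
        []
    let cand := PySem.List.sorted cand (fun x => x) false
    let group := cand.filter
      (fun j => !(j == i) && !(PySem.Set.contains st.2 j) &&
        decide (|s - PySem.List.pyGetD sp j 0| ≤ md) &&
        decide (|e - PySem.List.pyGetD ep j 0| ≤ md))
    if group.isEmpty then (PySem.Dict.insert st.1 i [], st.2)
    else
      let best := group.foldl
        (fun b j =>
          if PySem.List.pyGetD ep j 0 - PySem.List.pyGetD sp j 0 >
             PySem.List.pyGetD ep b 0 - PySem.List.pyGetD sp b 0
          then j else b) i
      (PySem.Dict.insert st.1 best (i :: group),
       PySem.Set.update (PySem.Set.add st.2 i) group)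

theorem gGrid_getD (sp ep : List Int) (c n : Int) (k : Int × Int) :
    PySem.Dict.getD (gGrid sp ep c n) k []
      = (PySem.List.pyRange 0 n 1).filter (fun j => gKeyOf sp ep c j == k) := by
  have h1 : gGrid sp ep c n
      = ((PySem.List.pyRange 0 n 1).map (fun j => (gKeyOf sp ep c j, j))).foldl
          (fun g p => PySem.Dict.modify g p.1 [] (· ++ [p.2])) PySem.Dict.empty := by
    rw [List.foldl_map]; rfl
  rw [h1, PySem.Dict.getD_foldl_modify_append, PySem.Dict.getD_empty, List.filter_map]
  simp [Function.comp_def]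

theorem gCand_flat (grid : PySem.Dict (Int × Int) (List Int)) (cs ce : Int) :
    (([-1, 0, 1] : List Int).foldl
      (fun acc ds =>
        ([-1, 0, 1] : List Int).foldl
          (fun acc de => acc ++ PySem.Dict.getD grid (cs + ds, ce + de) []) acc)
      [])
    = (gNb (cs, ce)).flatMap (fun k => PySem.Dict.getD grid k []) := by
  simp [gNb, List.foldl_cons, List.foldl_nil, List.append_assoc]

theorem gFilter_or_perm {α : Type} (p q : α → Bool) (h : ∀ x, p x = true → q x = false) :
    ∀ L : List α, (L.filter (fun x => p x || q x)).Perm (L.filter p ++ L.filter q) := by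
  intro L
  induction L with
  | nil => simp
  | cons a L ih =>
      by_cases hp : p a = true
      · have hq := h a hp
        simp only [List.filter_cons, hp, hq, Bool.true_or]
        simpa using ih.cons a
      · have hp' : p a = false := by cases hpa : p a; rfl; exact absurd hpa hp
        by_cases hq : q a = true
        · simp only [List.filter_cons, hp', hq, Bool.false_or]
          exact (ih.cons a).trans List.perm_middle.symm
        · have hq' : q a = false := by cases hqa : q a; rfl; exact absurd hqa hq
          simp only [List.filter_cons, hp', hq', Bool.false_or]
          simpa using ih

theorem gFlat_perm (f : Int → Int × Int) (L : List Int) :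
    ∀ keys : List (Int × Int), keys.Nodup →
    (keys.flatMap (fun k => L.filter (fun j => f j == k))).Perm
      (L.filter (fun j => keys.contains (f j))) := by
  intro keys
  induction keys with
  | nil => simp
  | cons k ks ih =>
      intro hnd
      have hk : k ∉ ks := (List.nodup_cons.mp hnd).1
      have ih' := ih (List.nodup_cons.mp hnd).2
      rw [List.flatMap_cons]
      have hdisj : ∀ j, (f j == k) = true → ks.contains (f j) = false := by
        intro j hj
        have : f j = k := by simpa using hj
        subst this
        simpa using hk
      have hperm := gFilter_or_perm (fun j => f j == k) (fun j => ks.contains (f j)) hdisj L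
      have hcons : (L.filter (fun j => (k :: ks).contains (f j)))
          = L.filter (fun j => (f j == k) || ks.contains (f j)) := by
        apply List.filter_congr
        intro j _
        rw [List.contains_cons]
      rw [hcons]
      exact (ih'.append_left (L.filter (fun j => f j == k))).trans hperm.symm

theorem gNb_nodup (q : Int × Int) : (gNb q).Nodup := by
  simp [gNb, Prod.ext_iff]

theorem gMem_nb (q k : Int × Int) :
    (gNb q).contains k = true ↔
      (q.1 - 1 ≤ k.1 ∧ k.1 ≤ q.1 + 1 ∧ q.2 - 1 ≤ k.2 ∧ k.2 ≤ q.2 + 1) := by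
  simp [gNb, Prod.ext_iff]
  omega

theorem gFdiv_near (c a b : Int) (hc : 0 < c) (h : |a - b| ≤ c - 1) :
    PySem.Int.floordiv a c - 1 ≤ PySem.Int.floordiv b c ∧
    PySem.Int.floordiv b c ≤ PySem.Int.floordiv a c + 1 := by
  have habs := abs_le.mp h
  set q := PySem.Int.floordiv a c with hq
  have h1 : q * c ≤ a := (PySem.Int.le_floordiv_iff_mul_le hc).mp (le_refl _)
  have h2 : a < (q + 1) * c := (PySem.Int.floordiv_lt_iff_lt_mul hc).mp (by omega)
  have e1 : (q - 1) * c = q * c - c := by ring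
  have e2 : (q + 2) * c = (q + 1) * c + c := by ring
  constructor
  · have hb : q - 1 ≤ PySem.Int.floordiv b c :=
      (PySem.Int.le_floordiv_iff_mul_le hc).mpr (by omega)
    omega
  · have hb : PySem.Int.floordiv b c < q + 2 :=
      (PySem.Int.floordiv_lt_iff_lt_mul hc).mpr (by omega)
    omega

theorem gNear_of_cond (sp ep : List Int) (md i j : Int)
    (h1 : |PySem.List.pyGetD sp i 0 - PySem.List.pyGetD sp j 0| ≤ md)
    (h2 : |PySem.List.pyGetD ep i 0 - PySem.List.pyGetD ep j 0| ≤ md) :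
    (gNb (gKeyOf sp ep (gCell md) i)).contains (gKeyOf sp ep (gCell md) j) = true := by
  have hmd : 0 ≤ md := le_trans (abs_nonneg _) h1
  have hcpos : 0 < gCell md := by simp [gCell]
  have hcell : gCell md - 1 = md := by simp [gCell]; omega
  rw [gMem_nb]
  have hs := gFdiv_near (gCell md) (PySem.List.pyGetD sp i 0) (PySem.List.pyGetD sp j 0) hcpos (by omega)
  have he := gFdiv_near (gCell md) (PySem.List.pyGetD ep i 0) (PySem.List.pyGetD ep j 0) hcpos (by omega)
  simp only [gKeyOf]
  exact ⟨by omega, by omega, by omega, by omega⟩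

theorem gCand_sorted (sp ep : List Int) (c n : Int) (q : Int × Int) :
    PySem.List.sorted ((gNb q).flatMap (fun k => PySem.Dict.getD (gGrid sp ep c n) k [])) (fun x => x) false
      = (PySem.List.pyRange 0 n 1).filter (fun j => (gNb q).contains (gKeyOf sp ep c j)) := by
  simp only [gGrid_getD]
  apply PySem.List.sorted_eq_of_perm_of_pairwise_lt
  · exact (gFlat_perm (gKeyOf sp ep c) (PySem.List.pyRange 0 n 1) (gNb q) (gNb_nodup q)).symm
  · exact (PySem.List.pairwise_lt_pyRange_one 0 n).filter _

theorem gBest_pair (sp ep : List Int) : ∀ (M : List Int) (b : Int),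
    M.foldl (bestStep sp ep) (b, gLen sp ep b)
      = (M.foldl (fun b j => if PySem.List.pyGetD ep j 0 - PySem.List.pyGetD sp j 0 >
                    PySem.List.pyGetD ep b 0 - PySem.List.pyGetD sp b 0 then j else b) b,
         gLen sp ep (M.foldl (fun b j => if PySem.List.pyGetD ep j 0 - PySem.List.pyGetD sp j 0 >
                    PySem.List.pyGetD ep b 0 - PySem.List.pyGetD sp b 0 then j else b) b)) := by
  intro M
  induction M with
  | nil => intro b; rfl
  | cons a M ih =>
      intro b
      rw [List.foldl_cons, List.foldl_cons]
      have hstep : bestStep sp ep (b, gLen sp ep b) a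
          = ((if PySem.List.pyGetD ep a 0 - PySem.List.pyGetD sp a 0 >
                 PySem.List.pyGetD ep b 0 - PySem.List.pyGetD sp b 0 then a else b),
             gLen sp ep (if PySem.List.pyGetD ep a 0 - PySem.List.pyGetD sp a 0 >
                 PySem.List.pyGetD ep b 0 - PySem.List.pyGetD sp b 0 then a else b)) := by
        simp only [bestStep, gLen]
        split_ifs <;> rfl
      rw [hstep]
      exact ih _

theorem gAStep_shape (sp ep : List Int) (md n i : Int) (d : PySem.Dict Int (List Int))
    (u : PySem.Set Int) (hui : PySem.Set.contains u i = false) :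
    outerStep sp ep md n (d, u) i
      = (if (PySem.List.pyRange 0 n 1).filter (innerP sp ep md i u) = [] then
           (PySem.Dict.insert d i [], u)
         else
           (PySem.Dict.insert d
              (((PySem.List.pyRange 0 n 1).filter (innerP sp ep md i u)).foldl (bestStep sp ep)
                (i, gLen sp ep i)).1
              (i :: (PySem.List.pyRange 0 n 1).filter (innerP sp ep md i u)),
            PySem.Set.update (PySem.Set.update u ((PySem.List.pyRange 0 n 1).filter (innerP sp ep md i u)))
              (i :: (PySem.List.pyRange 0 n 1).filter (innerP sp ep md i u)))) := by
  have hnm : i ∉ u := by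
    intro hm
    have hc := (PySem.Set.contains_iff u i).mpr hm
    rw [hui] at hc
    cases hc
  unfold outerStep
  rw [if_neg (by simp [hnm])]
  rw [inner_char sp ep md i _ (PySem.List.nodup_pyRange_one 0 n)]
  set Ma := (PySem.List.pyRange 0 n 1).filter (innerP sp ep md i u) with hMa
  by_cases hM : Ma = []
  · rw [if_pos hM]
    rw [if_neg (by simp [hM, PySem.List.len_eq])]
    simp [hM, PySem.Set.update]
  · rw [if_neg hM]
    have hlen : PySem.List.len ([i] ++ Ma) > 1 := by
      have : 0 < Ma.length := List.length_pos_iff.mpr hM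
      simp only [PySem.List.len_eq, List.length_append, List.length_cons, List.length_nil]
      omega
    rw [if_pos hlen]
    rfl

theorem gBStep_shape (sp ep : List Int) (md n i : Int) (d : PySem.Dict Int (List Int))
    (g : PySem.Set Int) (hgi : PySem.Set.contains g i = false) :
    bOuterStep sp ep md n (d, g) i
      = (if (PySem.List.pyRange 0 n 1).filter (innerP sp ep md i g) = [] then
           (PySem.Dict.insert d i [], g)
         else
           (PySem.Dict.insert d
              (((PySem.List.pyRange 0 n 1).filter (innerP sp ep md i g)).foldl
                (fun b j => if PySem.List.pyGetD ep j 0 - PySem.List.pyGetD sp j 0 >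
                    PySem.List.pyGetD ep b 0 - PySem.List.pyGetD sp b 0 then j else b) i)
              (i :: (PySem.List.pyRange 0 n 1).filter (innerP sp ep md i g)),
            PySem.Set.update (PySem.Set.add g i)
              ((PySem.List.pyRange 0 n 1).filter (innerP sp ep md i g)))) := by
  have hnm : i ∉ g := by
    intro hm
    have hc := (PySem.Set.contains_iff g i).mpr hm
    rw [hgi] at hc
    cases hc
  unfold bOuterStep
  rw [if_neg (by simp [hnm])]
  simp only []
  rw [gCand_flat, gCand_sorted]
  rw [List.filter_filter]
  have hgrp : (PySem.List.pyRange 0 n 1).filter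
      (fun j => (!(j == i) && !(PySem.Set.contains g j) &&
        decide (|PySem.List.pyGetD sp i 0 - PySem.List.pyGetD sp j 0| ≤ md) &&
        decide (|PySem.List.pyGetD ep i 0 - PySem.List.pyGetD ep j 0| ≤ md)) &&
        (gNb (PySem.Int.floordiv (PySem.List.pyGetD sp i 0) (gCell md),
              PySem.Int.floordiv (PySem.List.pyGetD ep i 0) (gCell md))).contains
          (gKeyOf sp ep (gCell md) j))
      = (PySem.List.pyRange 0 n 1).filter (innerP sp ep md i g) := by
    apply List.filter_congr
    intro j _
    by_cases hij : i = j
    · simp [innerP, hij]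
    · by_cases hgj : j ∈ g
      · simp [innerP, hgj]
      · by_cases h1 : |PySem.List.pyGetD sp i 0 - PySem.List.pyGetD sp j 0| ≤ md
        · by_cases h2 : |PySem.List.pyGetD ep i 0 - PySem.List.pyGetD ep j 0| ≤ md
          · have hji : (j == i) = false := beq_eq_false_iff_ne.mpr (fun e => hij e.symm)
            have hij' : (i == j) = false := beq_eq_false_iff_ne.mpr hij
            have hnear' : gKeyOf sp ep (gCell md) j ∈ gNb (gKeyOf sp ep (gCell md) i) := by
              simpa using gNear_of_cond sp ep md i j h1 h2
            simp only [gKeyOf] at hnear'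
            simp [innerP, gCondB, gKeyOf, hji, hij', hgj, h1, h2, hnear']
          · simp [innerP, gCondB, h2]
        · simp [innerP, gCondB, h1]
  rw [hgrp]
  by_cases hM : (PySem.List.pyRange 0 n 1).filter (innerP sp ep md i g) = []
  · simp [hM]
  · simp [List.isEmpty_iff, hM]

theorem gStep_eq (sp ep : List Int) (md n i : Int) (d : PySem.Dict Int (List Int))
    (u g : PySem.Set Int) (hug : ∀ k, PySem.Set.contains u k = PySem.Set.contains g k) :
    (outerStep sp ep md n (d, u) i).1 = (bOuterStep sp ep md n (d, g) i).1 ∧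
    ∀ k, PySem.Set.contains (outerStep sp ep md n (d, u) i).2 k
        = PySem.Set.contains (bOuterStep sp ep md n (d, g) i).2 k := by
  by_cases hui : PySem.Set.contains u i = true
  · have hgi : PySem.Set.contains g i = true := (hug i) ▸ hui
    unfold outerStep bOuterStep
    rw [if_pos hui, if_pos hgi]
    exact ⟨rfl, hug⟩
  · have hui' : PySem.Set.contains u i = false := by
      cases hx : PySem.Set.contains u i; rfl; exact absurd hx hui
    have hgi' : PySem.Set.contains g i = false := (hug i) ▸ hui'
    rw [gAStep_shape sp ep md n i d u hui', gBStep_shape sp ep md n i d g hgi']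
    have hfe : (PySem.List.pyRange 0 n 1).filter (innerP sp ep md i u)
        = (PySem.List.pyRange 0 n 1).filter (innerP sp ep md i g) := by
      apply List.filter_congr
      intro j _
      have hb : decide (j ∈ u) = decide (j ∈ g) := by
        have h := hug j
        simpa using h
      simp [innerP, hb]
    rw [hfe]
    set M := (PySem.List.pyRange 0 n 1).filter (innerP sp ep md i g) with hM
    by_cases hMe : M = []
    · rw [if_pos hMe, if_pos hMe]
      exact ⟨rfl, hug⟩
    · rw [if_neg hMe, if_neg hMe]
      constructor
      · rw [gBest_pair sp ep M i]
      · intro k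
        simp only [gmc_contains_update, gmc_contains_add, List.contains_cons, hug k]
        cases PySem.Set.contains g k <;> cases (k == i) <;> cases M.contains k <;> rfl

theorem gFold_eq (sp ep : List Int) (md n : Int) :
    ∀ (L : List Int) (d : PySem.Dict Int (List Int)) (u g : PySem.Set Int),
    (∀ k, PySem.Set.contains u k = PySem.Set.contains g k) →
    (L.foldl (outerStep sp ep md n) (d, u)).1 = (L.foldl (bOuterStep sp ep md n) (d, g)).1 := by
  intro L
  induction L with
  | nil => intro d u g _; rfl
  | cons a L ih =>
      intro d u g hug
      rw [List.foldl_cons, List.foldl_cons]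
      obtain ⟨h1, h2⟩ := gStep_eq sp ep md n a d u g hug
      rcases hA : outerStep sp ep md n (d, u) a with ⟨d1, u1⟩
      rcases hB : bOuterStep sp ep md n (d, g) a with ⟨d2, g2⟩
      rw [hA, hB] at h1 h2
      simp only [] at h1
      rw [h1]
      exact ih d2 u1 g2 h2

theorem gStep_mono (sp ep : List Int) (md n : Int) (st : PySem.Dict Int (List Int) × PySem.Set Int)
    (i j : Int) :
    (PySem.Set.contains st.2 j = true → PySem.Set.contains (outerStep sp ep md n st i).2 j = true) ∧
    (PySem.Dict.contains st.1 j = true → PySem.Dict.contains (outerStep sp ep md n st i).1 j = true) := by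
  obtain ⟨d, u⟩ := st
  by_cases hui : PySem.Set.contains u i = true
  · unfold outerStep
    rw [if_pos hui]
    exact ⟨id, id⟩
  · have hui' : PySem.Set.contains u i = false := by
      cases hx : PySem.Set.contains u i; rfl; exact absurd hx hui
    rw [gAStep_shape sp ep md n i d u hui']
    split_ifs
    · exact ⟨id, fun h => gmc_dcontains_insert_true _ _ _ _ h⟩
    · exact ⟨fun h => gmc_contains_update_true _ _ _ (gmc_contains_update_true _ _ _ h),
        fun h => gmc_dcontains_insert_true _ _ _ _ h⟩

theorem gStep_cover_self (sp ep : List Int) (md n : Int)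
    (st : PySem.Dict Int (List Int) × PySem.Set Int) (i : Int) :
    PySem.Set.contains (outerStep sp ep md n st i).2 i = true ∨
    PySem.Dict.contains (outerStep sp ep md n st i).1 i = true := by
  obtain ⟨d, u⟩ := st
  by_cases hui : PySem.Set.contains u i = true
  · left
    unfold outerStep
    rw [if_pos hui]
    exact hui
  · have hui' : PySem.Set.contains u i = false := by
      cases hx : PySem.Set.contains u i; rfl; exact absurd hx hui
    rw [gAStep_shape sp ep md n i d u hui']
    split_ifs
    · right
      rw [PySem.Dict.contains_insert]
      simp
    · left
      rw [gmc_contains_update, List.contains_cons]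
      simp

theorem gCover (sp ep : List Int) (md n : Int) :
    ∀ (L : List Int) (d : PySem.Dict Int (List Int)) (u : PySem.Set Int) (j : Int),
    (j ∈ L ∨ PySem.Set.contains u j = true ∨ PySem.Dict.contains d j = true) →
    PySem.Set.contains (L.foldl (outerStep sp ep md n) (d, u)).2 j = true ∨
    PySem.Dict.contains (L.foldl (outerStep sp ep md n) (d, u)).1 j = true := by
  intro L
  induction L with
  | nil =>
      intro d u j h
      rcases h with h | h | h
      · cases h
      · exact Or.inl h
      · exact Or.inr h
  | cons a L ih =>
      intro d u j h
      rw [List.foldl_cons]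
      have hst : outerStep sp ep md n (d, u) a
          = ((outerStep sp ep md n (d, u) a).1, (outerStep sp ep md n (d, u) a).2) := rfl
      rw [hst]
      apply ih
      rcases h with h | h | h
      · rcases List.mem_cons.mp h with h | h
        · subst h
          rcases gStep_cover_self sp ep md n (d, u) j with hc | hc
          · exact Or.inr (Or.inl hc)
          · exact Or.inr (Or.inr hc)
        · exact Or.inl h
      · exact Or.inr (Or.inl ((gStep_mono sp ep md n (d, u) a j).1 h))
      · exact Or.inr (Or.inr ((gStep_mono sp ep md n (d, u) a j).2 h))

theorem A_eq (sp ep : List Int) (md : Int) :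
    group_miss_cleaved_peptides sp ep md =
      ((PySem.List.pyRange 0 (PySem.List.len sp) 1).foldl
        (fun d i =>
          if PySem.Dict.contains d i = false ∧
             PySem.Set.contains ((PySem.List.pyRange 0 (PySem.List.len sp) 1).foldl
               (outerStep sp ep md (PySem.List.len sp))
               (PySem.Dict.empty, PySem.Set.empty)).2 i = false
          then PySem.Dict.insert d i [] else d)
        ((PySem.List.pyRange 0 (PySem.List.len sp) 1).foldl
          (outerStep sp ep md (PySem.List.len sp))
          (PySem.Dict.empty, PySem.Set.empty)).1).items := rfl

theorem B_eq (sp ep : List Int) (md : Int) :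
    group_miss_cleaved_peptides_alt sp ep md =
      ((PySem.List.pyRange 0 (PySem.List.len sp) 1).foldl
        (bOuterStep sp ep md (PySem.List.len sp))
        (PySem.Dict.empty, PySem.Set.empty)).1.items := rfl

theorem pvWitness_ok :
    Dom_group_miss_cleaved_peptides pvWitness_group_miss_cleaved_peptides.1 pvWitness_group_miss_cleaved_peptides.2.1 pvWitness_group_miss_cleaved_peptides.2.2 ∧
    Pre_group_miss_cleaved_peptides pvWitness_group_miss_cleaved_peptides.1 pvWitness_group_miss_cleaved_peptides.2.1 pvWitness_group_miss_cleaved_peptides.2.2 := by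
  decide

-- ===== VERDICT (by name: the statement is the Claim_ definition above) =====
theorem group_miss_cleaved_peptides_spec : Claim_equal_group_miss_cleaved_peptides := by
  intro sp ep md hdom hpre
  unfold Spec_group_miss_cleaved_peptides
  rw [A_eq, B_eq]
  rw [loop2_id _ _ _ (by
    intro j hj
    rcases gCover sp ep md (PySem.List.len sp) (PySem.List.pyRange 0 (PySem.List.len sp) 1)
      PySem.Dict.empty PySem.Set.empty j (Or.inl hj) with h | h
    · exact Or.inl h
    · exact Or.inr h)]
  exact congrArg PySem.Dict.items (gFold_eq sp ep md (PySem.List.len sp) (PySem.List.pyRange 0 (PySem.List.len sp) 1)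
    PySem.Dict.empty PySem.Set.empty PySem.Set.empty (fun _ => rfl))
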